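-- pv_equiv track=rewrite | github.com/cdjasonj/datagrand | outputs/result_process.py | find_wrong_position
-- ===== SOURCE A (Python) =====
-- def find_wrong_position(labels):
--     last_label = 'start'
--     start_index, end_index = -1, -1
--     for idx, label in enumerate(labels):
--         # 找到
--         if last_label == 'O' and label.split('-')[0] == 'I':
--             start_index = idx
--             last_label = label
--
--             for i in range(idx, len(labels)):
--                 if labels[i] != label:  # 找到end_index
--                     end_index = i - 1
--                     break
--         else:
--             last_label = label
--
--     return (start_index, end_index)
-- ===== SOURCE B (Python) =====
-- def find_wrong_position(labels):
--     start_index, end_index = -1, -1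
--     last_label = 'start'
--     run_label = None
--     for i, label in enumerate(labels):
--         if run_label is not None and label != run_label:
--             end_index = i - 1
--             run_label = None
--         if last_label == 'O' and label.split('-')[0] == 'I':
--             start_index = i
--             run_label = label
--         last_label = label
--     return (start_index, end_index)
-- ===== Notes on version B (the rewrite author's own statement) =====
-- stated objective: simpler
-- what changed: Replaced A's nested inner scan (restarted at every trigger) by a single linear pass that carries a run-state flag and closes the run when a differing label is met.
import Mathlib
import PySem

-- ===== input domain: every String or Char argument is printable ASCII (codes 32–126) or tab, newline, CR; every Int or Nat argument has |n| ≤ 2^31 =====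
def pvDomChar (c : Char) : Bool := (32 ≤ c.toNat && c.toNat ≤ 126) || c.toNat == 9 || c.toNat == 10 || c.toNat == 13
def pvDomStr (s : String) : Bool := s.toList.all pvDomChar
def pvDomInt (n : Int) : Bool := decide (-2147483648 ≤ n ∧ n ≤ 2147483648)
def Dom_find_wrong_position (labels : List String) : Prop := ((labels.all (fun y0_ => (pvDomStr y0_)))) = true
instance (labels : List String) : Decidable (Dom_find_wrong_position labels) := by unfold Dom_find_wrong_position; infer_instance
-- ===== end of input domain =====

-- B replaces A's nested inner scan by a single linear pass with a run-state flag (objective: simpler).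

-- ===== PORT A =====
-- enumerate(labels): indices are the nonnegative ints 0,1,2,…, modeled as Nat and cast to Int where stored.
def pvEnum (xs : List String) (i : Nat) : List (Nat × String) :=
  match xs with
  | [] => []
  | x :: rest => (i, x) :: pvEnum rest (i + 1)

-- inner loop `for i in range(idx, len(labels)): if labels[i] != label: end_index = i-1; break`
-- (labels[i] is always in range here, so the Nat-indexed access is exact)
def pvInnerA (labels : List String) (label : String) (i : Nat) (e : Int) : Int :=
  if h : i < labels.length then
    if labels[i] ≠ label then (i : Int) - 1
    else pvInnerA labels label (i + 1) e
  else e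
termination_by labels.length - i

def pvLoopA (labels : List String) : List (Nat × String) → String → Int → Int → Int × Int
  | [], _, s, e => (s, e)
  | (idx, label) :: rest, last, s, e =>
    if last = "O" ∧ ((PySem.Str.split? label "-").getD []).headD "" = "I" then
      pvLoopA labels rest label (idx : Int) (pvInnerA labels label idx e)
    else
      pvLoopA labels rest label s e

def find_wrong_position (labels : List String) : Int × Int :=
  pvLoopA labels (pvEnum labels 0) "start" (-1) (-1)

-- ===== PORT B =====
def pvLoopB : List (Nat × String) → String → Option String → Int → Int → Int × Int
  | [], _, _, s, e => (s, e)
  | (i, label) :: rest, last, run, s, e =>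
    let st : Option String × Int :=
      match run with
      | some r => if label ≠ r then (none, (i : Int) - 1) else (some r, e)
      | none => (none, e)
    if last = "O" ∧ ((PySem.Str.split? label "-").getD []).headD "" = "I" then
      pvLoopB rest label (some label) (i : Int) st.2
    else
      pvLoopB rest label st.1 s st.2

def find_wrong_position_alt (labels : List String) : Int × Int :=
  pvLoopB (pvEnum labels 0) "start" none (-1) (-1)

-- ===== PRECONDITION & SPEC =====
def Spec_find_wrong_position (labels : List String) (out : Int × Int) : Prop := out = find_wrong_position_alt labels
instance (labels : List String) (out : Int × Int) : Decidable (Spec_find_wrong_position labels out) := by unfold Spec_find_wrong_position; infer_instance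

-- ===== CLAIM (what is proved, stated in full; the proofs are below) =====
def Claim_equal_find_wrong_position : Prop := ∀ (labels : List String), Dom_find_wrong_position labels → Spec_find_wrong_position labels (find_wrong_position labels)

-- ===== LEMMAS AND PROOFS =====

-- list-structural view of A's inner scan
def pvScanRun (r : String) : List String → Nat → Int → Int
  | [], _, e => e
  | x :: xs, i, e => if x ≠ r then (i : Int) - 1 else pvScanRun r xs (i + 1) e

lemma pvInnerA_eq_scan (labels : List String) (r : String) :
    ∀ i e, pvInnerA labels r i e = pvScanRun r (labels.drop i) i e := by
  intro i
  induction hn : labels.length - i using Nat.strong_induction_on generalizing i with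
  | _ n ih =>
    intro e
    rw [pvInnerA]
    by_cases h : i < labels.length
    · have hd : labels.drop i = labels[i] :: labels.drop (i + 1) :=
        (List.getElem_cons_drop h).symm
      rw [hd]
      simp only [h, dif_pos, pvScanRun]
      by_cases hx : labels[i] = r
      · have hcond : ¬ (labels[i] ≠ r) := by simp [hx]
        rw [if_neg hcond, if_neg hcond]
        exact ih (labels.length - (i + 1)) (by omega) (i + 1) rfl e
      · simp [hx]
    · have : labels.drop i = [] := List.drop_eq_nil_of_le (by omega)
      simp [h, this, pvScanRun]

lemma pv_run_ne_O (r : String)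
    (hr : ((PySem.Str.split? r "-").getD []).headD "" = "I") : r ≠ "O" := by
  intro h; subst h; revert hr; decide

-- joint invariant: mode1 (no active run) and mode2 (inside a run of label r)
lemma pv_joint (labels : List String) :
    ∀ rest : List String,
      (∀ i last s e, rest = labels.drop i →
        pvLoopA labels (pvEnum rest i) last s e = pvLoopB (pvEnum rest i) last none s e)
      ∧ (∀ i r s e, ((PySem.Str.split? r "-").getD []).headD "" = "I" →
          rest = labels.drop i →
          pvLoopA labels (pvEnum rest i) r s (pvScanRun r rest i e)
            = pvLoopB (pvEnum rest i) r (some r) s e) := by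
  intro rest
  induction rest with
  | nil => exact ⟨fun i last s e _ => rfl, fun i r s e _ _ => rfl⟩
  | cons x rest' ih =>
    constructor
    · intro i last s e hdrop
      have hdrop' : rest' = labels.drop (i + 1) := by
        have h2 := congrArg (List.drop 1) hdrop
        simpa [List.drop_drop, Nat.add_comm] using h2
      simp only [pvEnum, pvLoopA, pvLoopB]
      by_cases hc : last = "O" ∧ ((PySem.Str.split? x "-").getD []).headD "" = "I"
      · have hx : labels.drop i = x :: rest' := hdrop.symm
        rw [if_pos hc, if_pos hc]
        have hinner : pvInnerA labels x i e = pvScanRun x rest' (i + 1) e := by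
          rw [pvInnerA_eq_scan, hx, pvScanRun]; simp
        rw [hinner]
        exact (ih.2) (i + 1) x (i : Int) e hc.2 hdrop'
      · rw [if_neg hc, if_neg hc]
        exact (ih.1) (i + 1) x s e hdrop'
    · intro i r s e hr hdrop
      have hdrop' : rest' = labels.drop (i + 1) := by
        have h2 := congrArg (List.drop 1) hdrop
        simpa [List.drop_drop, Nat.add_comm] using h2
      have hne : r ≠ "O" := pv_run_ne_O r hr
      simp only [pvEnum, pvLoopA, pvLoopB]
      have hc : ¬ (r = "O" ∧ ((PySem.Str.split? x "-").getD []).headD "" = "I") := by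
        intro h; exact hne h.1
      rw [if_neg hc, if_neg hc]
      by_cases hx : x = r
      · subst hx
        simp only [pvScanRun, ne_eq, not_true_eq_false, if_false]
        exact (ih.2) (i + 1) x s e hr hdrop'
      · simp only [pvScanRun, if_pos hx]
        exact (ih.1) (i + 1) x s ((i : Int) - 1) hdrop'

-- ===== VERDICT (by name: the statement is the Claim_ definition above) =====
theorem find_wrong_position_spec : Claim_equal_find_wrong_position := by
  intro labels _
  unfold Spec_find_wrong_position find_wrong_position find_wrong_position_alt
  exact (pv_joint labels labels).1 0 "start" (-1) (-1) rfl
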